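-- pv_equiv track=rewrite | github.com/shisa-ai/shisad | src/shisad/ui/evidence.py | _normalize_literal_linebreak_escapes
-- ===== SOURCE A (Python) =====
-- def _normalize_literal_linebreak_escapes(value: str) -> str:
--     chars: list[str] = []
--     escaped = False
--     index = 0
--     while index < len(value):
--         char = value[index]
--         if not escaped:
--             if char == "\\":
--                 escaped = True
--             else:
--                 chars.append(char)
--             index += 1
--             continue
--         if char == "\\":
--             chars.append("\\")
--             escaped = False
--             index += 1
--             continue
--         if char == "r":
--             if index + 2 < len(value) and value[index + 1] == "\\" and value[index + 2] == "n":
--                 chars.append("\n")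
--                 escaped = False
--                 index += 3
--                 continue
--             chars.append("\n")
--             escaped = False
--             index += 1
--             continue
--         if char == "n":
--             chars.append("\n")
--             escaped = False
--             index += 1
--             continue
--         chars.append("\\")
--         chars.append(char)
--         escaped = False
--         index += 1
--     if escaped:
--         chars.append("\\")
--     return "".join(chars)
-- ===== SOURCE B (Python) =====
-- def _normalize_literal_linebreak_escapes(value: str) -> str:
--     # Token scanner: match whole escape tokens with lookahead instead of a
--     # one-char-at-a-time state machine with an "escaped" flag.
--     out: list[str] = []
--     i = 0
--     n = len(value)
--     while i < n:
--         if value.startswith("\\\\", i):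
--             out.append("\\")
--             i += 2
--         elif value.startswith("\\r\\n", i):
--             out.append("\n")
--             i += 4
--         elif value.startswith("\\r", i) or value.startswith("\\n", i):
--             out.append("\n")
--             i += 2
--         elif value[i] == "\\" and i + 1 < n:
--             out.append(value[i : i + 2])
--             i += 2
--         else:
--             out.append(value[i])
--             i += 1
--     return "".join(out)
-- ===== Notes on version B (the rewrite author's own statement) =====
-- stated objective: simpler
-- what changed: Replaces A's one-character-at-a-time state machine, which carries a boolean escape flag across iterations, by a stateless scanner that matches each complete escape token with lookahead and strides past the whole token.
import Mathlib
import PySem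

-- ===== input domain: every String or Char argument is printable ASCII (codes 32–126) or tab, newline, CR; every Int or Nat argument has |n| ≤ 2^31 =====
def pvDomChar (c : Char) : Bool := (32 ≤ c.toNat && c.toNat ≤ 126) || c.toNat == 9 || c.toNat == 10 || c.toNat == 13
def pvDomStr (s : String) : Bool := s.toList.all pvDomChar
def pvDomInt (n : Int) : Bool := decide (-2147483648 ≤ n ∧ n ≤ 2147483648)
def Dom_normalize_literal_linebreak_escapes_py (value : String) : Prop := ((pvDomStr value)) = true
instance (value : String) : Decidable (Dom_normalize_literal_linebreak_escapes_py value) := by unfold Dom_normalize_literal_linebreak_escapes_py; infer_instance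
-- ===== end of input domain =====

-- B replaces A's one-char-at-a-time state machine carrying a boolean escape flag by a whole-token scanner
-- matching complete escape sequences with lookahead; objective: simpler, same cost.

-- ===== PORT A =====
-- A's while loop over `index` with its boolean escape flag and the `chars` accumulator;
-- the advancing index becomes structural recursion on the remaining suffix.
def pvLoopA : List Char → Bool → List Char
  | [], escaped => if escaped then ['\\'] else []
  | c :: rest, escaped =>
    if escaped = false then
      if c = '\\' then pvLoopA rest true
      else c :: pvLoopA rest false
    else
      if c = '\\' then '\\' :: pvLoopA rest false
      else if c = 'r' then
        -- 'index + 2 < len(value) and value[index+1] == "\\" and value[index+2] == "n"':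
        -- relative to the suffix `rest` these are rest[0] and rest[1]; 'index += 3' drops them
        if rest[0]? = some '\\' ∧ rest[1]? = some 'n' then
          '\n' :: pvLoopA (rest.drop 2) false
        else
          '\n' :: pvLoopA rest false
      else if c = 'n' then '\n' :: pvLoopA rest false
      else '\\' :: c :: pvLoopA rest false
  termination_by l _ => l.length
  decreasing_by all_goals (simp_all; try omega)

def normalize_literal_linebreak_escapes_py (value : String) : String :=
  String.ofList (pvLoopA value.toList false)

-- ===== PORT B =====
-- Source B's token loop: each branch of the `while` matches one whole token at position i
-- (startswith with offset = the list pattern on the current suffix) and strides past it.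
def pvLoopB : List Char → List Char
  | '\\' :: '\\' :: rest => '\\' :: pvLoopB rest
  | '\\' :: 'r' :: '\\' :: 'n' :: rest => '\n' :: pvLoopB rest
  | '\\' :: 'r' :: rest => '\n' :: pvLoopB rest
  | '\\' :: 'n' :: rest => '\n' :: pvLoopB rest
  | '\\' :: c :: rest => '\\' :: c :: pvLoopB rest
  | c :: rest => c :: pvLoopB rest   -- single-char token (incl. a trailing lone '\\')
  | [] => []

def normalize_literal_linebreak_escapes_py_alt (value : String) : String :=
  String.ofList (pvLoopB value.toList)

-- ===== PRECONDITION & SPEC =====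
def Spec_normalize_literal_linebreak_escapes_py (value : String) (out : String) : Prop := out = normalize_literal_linebreak_escapes_py_alt value
instance (value : String) (out : String) : Decidable (Spec_normalize_literal_linebreak_escapes_py value out) := by unfold Spec_normalize_literal_linebreak_escapes_py; infer_instance

-- ===== CLAIM (what is proved, stated in full; the proofs are below) =====
def Claim_equal_normalize_literal_linebreak_escapes_py : Prop := ∀ (value : String), Dom_normalize_literal_linebreak_escapes_py value → Spec_normalize_literal_linebreak_escapes_py value (normalize_literal_linebreak_escapes_py value)

-- ===== LEMMAS AND PROOFS =====

theorem pvLoopA_eq_pvLoopB : ∀ l : List Char, pvLoopA l false = pvLoopB l := by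
  intro l
  fun_induction pvLoopB l
  all_goals try simp_all [pvLoopA]
  -- remaining: '\'::'r'::rest with rest not of shape '\'::'n'::_, and the single-char token
  next rest x ih =>
    intro h0 h1
    rcases rest with _ | ⟨a, _ | ⟨b, r⟩⟩ <;> simp_all
  next c rest x ih =>
    intro hc
    subst hc
    rcases rest with _ | ⟨d, r⟩
    · simp [pvLoopA, pvLoopB]
    · exact absurd rfl (x d r rfl)

-- ===== VERDICT (by name: the statement is the Claim_ definition above) =====
theorem normalize_literal_linebreak_escapes_py_spec : Claim_equal_normalize_literal_linebreak_escapes_py := by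
  intro value _
  unfold Spec_normalize_literal_linebreak_escapes_py normalize_literal_linebreak_escapes_py normalize_literal_linebreak_escapes_py_alt
  rw [pvLoopA_eq_pvLoopB]
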